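-- pv_equiv track=rewrite | github.com/rowlanja/CSU33012_Github_Visualizer | app/main.py | deriveActivityInfo
-- ===== SOURCE A (Python) =====
-- def deriveActivityInfo(commitTimes) :
--     description = {}
--     found = False
--     earliestTime = ""
--     latestTime = ""
--     peakTime = "00:00"
--     peakValues = 0
--     for key, value in commitTimes.items() :
--         timeInt = int(key[0:2])
--         if(value > peakValues) :
--             peakTime = key
--             peakValues = value
--         if(found == False and value != 0) :
--             earliestTime = key
--             found = True
--         if(value != 0) :
--             latestTime = key
--
--
--     description[" Earliest commit Time "] = earliestTime
--     description[" Latest working Time  "] = latestTime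
--     description[" Activity Peak  "] = "This users peak time was " + peakTime + " with a value of : " + str(peakValues)
--     if(int(earliestTime[0:2]) < 12) :
--         description["Early Working Time Information"] = "This user is good at working in the morning"
--     else : description["Early Working Time Information"] = " This user does not like to work in the morning"
--     if(int(latestTime[0:2]) > 18) :
--         description["Late Working Time Information"] = "This user is likes working in the evening"
--     else : description["Late Working Time Information"] = "This user doesnt like working in the evening"
--     if(int(latestTime[0:2]) - int(earliestTime[0:2]) > 4) :
--         description["Work time range information"] = "this user works at a variety of times"
--     else : description["Work time range information"] = "this user prefers working at the same time everyday"
--     return description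
-- ===== SOURCE B (Python) =====
-- def deriveActivityInfo(commitTimes):
--     items = list(commitTimes.items())
--     earliestTime = next((k for k, v in items if v != 0), "")
--     latestTime = next((k for k, v in reversed(items) if v != 0), "")
--     ranked = sorted(items, key=lambda kv: kv[1], reverse=True)
--     peakTime, peakValues = ranked[0] if ranked and ranked[0][1] > 0 else ("00:00", 0)
--     e = int(earliestTime[0:2])
--     l = int(latestTime[0:2])
--     return {
--         " Earliest commit Time ": earliestTime,
--         " Latest working Time  ": latestTime,
--         " Activity Peak  ": "This users peak time was " + peakTime + " with a value of : " + str(peakValues),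
--         "Early Working Time Information": "This user is good at working in the morning" if e < 12
--             else " This user does not like to work in the morning",
--         "Late Working Time Information": "This user is likes working in the evening" if l > 18
--             else "This user doesnt like working in the evening",
--         "Work time range information": "this user works at a variety of times" if l - e > 4
--             else "this user prefers working at the same time everyday",
--     }
-- ===== Notes on version B (the rewrite author's own statement) =====
-- stated objective: alternative
-- what changed: A's one fused loop with five mutable state variables is replaced by three independent mechanisms: first-match search forward for the earliest nonzero key, first-match search over the reversed items for the latest, and a stable descending sort by value whose head (if positive) is the peak, relying on Python's stable reverse sort preserving first-occurrence tie-breaking.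
import Mathlib
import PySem

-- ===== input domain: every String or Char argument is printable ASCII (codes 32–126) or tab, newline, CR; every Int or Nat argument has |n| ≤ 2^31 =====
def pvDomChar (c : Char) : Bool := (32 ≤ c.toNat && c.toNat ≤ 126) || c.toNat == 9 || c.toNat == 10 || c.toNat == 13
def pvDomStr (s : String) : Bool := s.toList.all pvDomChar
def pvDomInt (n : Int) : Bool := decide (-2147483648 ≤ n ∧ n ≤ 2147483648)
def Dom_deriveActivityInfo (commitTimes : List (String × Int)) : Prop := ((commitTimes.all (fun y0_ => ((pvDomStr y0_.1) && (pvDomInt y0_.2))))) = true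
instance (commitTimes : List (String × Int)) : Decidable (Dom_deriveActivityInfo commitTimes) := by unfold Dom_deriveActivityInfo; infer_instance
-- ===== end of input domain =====

-- B replaces A's fused five-variable loop with three independent mechanisms (forward first-match,
-- first-match over the reversed items, stable descending sort whose head is the peak); same return
-- value on all of Pre_.

-- ===== PORT A =====
-- one iteration of A's loop body over the state (found, earliestTime, latestTime, peakTime, peakValues);
-- A's 'timeInt = int(key[0:2])' is unused by the result and raises only outside Pre_, so it binds no value here
def pvStepA (s : Bool × String × String × String × Int) (kv : String × Int) :
    Bool × String × String × String × Int :=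
  let found := s.1
  let e := s.2.1
  let l := s.2.2.1
  let p := s.2.2.2.1
  let pv := s.2.2.2.2
  let ppv := if pv < kv.2 then (kv.1, kv.2) else (p, pv)
  let fe := if found = false ∧ kv.2 ≠ 0 then (true, kv.1) else (found, e)
  let l' := if kv.2 ≠ 0 then kv.1 else l
  (fe.1, fe.2, l', ppv.1, ppv.2)

def deriveActivityInfo (commitTimes : List (String × Int)) : List (String × String) :=
  let s := commitTimes.foldl pvStepA (false, "", "", "00:00", 0)
  let earliestTime := s.2.1
  let latestTime := s.2.2.1
  let peakTime := s.2.2.2.1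
  let peakValues := s.2.2.2.2
  -- int(earliestTime[0:2]) / int(latestTime[0:2]); ofStr? = none is Python's ValueError, excluded by Pre_
  let eInt := (PySem.Int.ofStr? (PySem.Str.slice earliestTime (some 0) (some 2))).getD 0
  let lInt := (PySem.Int.ofStr? (PySem.Str.slice latestTime (some 0) (some 2))).getD 0
  [(" Earliest commit Time ", earliestTime),
   (" Latest working Time  ", latestTime),
   (" Activity Peak  ", "This users peak time was " ++ peakTime ++ " with a value of : " ++ PySem.Int.toStr peakValues),
   ("Early Working Time Information",
     if eInt < 12 then "This user is good at working in the morning"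
     else " This user does not like to work in the morning"),
   ("Late Working Time Information",
     if 18 < lInt then "This user is likes working in the evening"
     else "This user doesnt like working in the evening"),
   ("Work time range information",
     if 4 < lInt - eInt then "this user works at a variety of times"
     else "this user prefers working at the same time everyday")]

-- ===== PORT B =====
def deriveActivityInfo_alt (commitTimes : List (String × Int)) : List (String × String) :=
  let items := commitTimes
  -- next((k for k, v in items if v != 0), "") : first match forward
  let earliestTime := ((items.find? (fun kv => decide (kv.2 ≠ 0))).map Prod.fst).getD ""
  -- next((k for k, v in reversed(items) if v != 0), "") : first match over the reversed items
  let latestTime := ((items.reverse.find? (fun kv => decide (kv.2 ≠ 0))).map Prod.fst).getD ""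
  -- sorted(items, key=lambda kv: kv[1], reverse=True) : stable descending sort by value
  let ranked := PySem.List.sorted items Prod.snd true
  let peak := match ranked.head? with
    | some r => if 0 < r.2 then r else ("00:00", 0)
    | none => ("00:00", 0)
  let peakTime := peak.1
  let peakValues := peak.2
  -- int(earliestTime[0:2]) / int(latestTime[0:2]); ofStr? = none is Python's ValueError, excluded by Pre_
  let eInt := (PySem.Int.ofStr? (PySem.Str.slice earliestTime (some 0) (some 2))).getD 0
  let lInt := (PySem.Int.ofStr? (PySem.Str.slice latestTime (some 0) (some 2))).getD 0
  [(" Earliest commit Time ", earliestTime),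
   (" Latest working Time  ", latestTime),
   (" Activity Peak  ", "This users peak time was " ++ peakTime ++ " with a value of : " ++ PySem.Int.toStr peakValues),
   ("Early Working Time Information",
     if eInt < 12 then "This user is good at working in the morning"
     else " This user does not like to work in the morning"),
   ("Late Working Time Information",
     if 18 < lInt then "This user is likes working in the evening"
     else "This user doesnt like working in the evening"),
   ("Work time range information",
     if 4 < lInt - eInt then "this user works at a variety of times"
     else "this user prefers working at the same time everyday")]

-- ===== PRECONDITION & SPEC =====
-- Pre_ excludes exactly the inputs where the Python A raises ValueError: a key whose first two
-- characters int() rejects, or no nonzero value (the earliest/latest strings stay empty and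
-- int() rejects the empty slice); A returns on all of Pre_.
def Pre_deriveActivityInfo (commitTimes : List (String × Int)) : Prop :=
  (∀ kv ∈ commitTimes, (PySem.Int.ofStr? (PySem.Str.slice kv.1 (some 0) (some 2))).isSome = true) ∧
  (∃ kv ∈ commitTimes, kv.2 ≠ 0)
instance (commitTimes : List (String × Int)) : Decidable (Pre_deriveActivityInfo commitTimes) := by
  unfold Pre_deriveActivityInfo; infer_instance

def pvWitness_deriveActivityInfo : (List (String × Int)) := [("10:00", 1), ("23:15", 0)]

def Spec_deriveActivityInfo (commitTimes : List (String × Int)) (out : List (String × String)) : Prop := out = deriveActivityInfo_alt commitTimes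
instance (commitTimes : List (String × Int)) (out : List (String × String)) : Decidable (Spec_deriveActivityInfo commitTimes out) := by unfold Spec_deriveActivityInfo; infer_instance

-- ===== CLAIM (what is proved, stated in full; the proofs are below) =====
def Claim_equal_deriveActivityInfo : Prop := ∀ (commitTimes : List (String × Int)), Dom_deriveActivityInfo commitTimes → Pre_deriveActivityInfo commitTimes → Spec_deriveActivityInfo commitTimes (deriveActivityInfo commitTimes)

-- ===== LEMMAS AND PROOFS =====

-- the peak-tracking part of A's loop, in isolation
def pvPeakStep (s : String × Int) (kv : String × Int) : String × Int :=
  if s.2 < kv.2 then (kv.1, kv.2) else s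

-- the folding step of PySem.List.max? with the Prod.snd key
def pvMaxStep (acc : Option (String × Int)) (x : String × Int) : Option (String × Int) :=
  match acc with
  | none => some x
  | some m => if Prod.snd m < Prod.snd x then some x else some m

-- getLast?-with-default steps through a cons
theorem pvGetLastD_cons (a : String) (ys : List String) (d : String) :
    (a :: ys).getLast?.getD d = ys.getLast?.getD a := by
  cases ys with
  | nil => rfl
  | cons b t => rw [List.getLast?_cons_cons]; rfl

-- A's fold, characterised componentwise
theorem pvFoldA_eq (xs : List (String × Int)) : ∀ (found : Bool) (e l p : String) (pv : Int),
    xs.foldl pvStepA (found, e, l, p, pv) =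
      ((found || xs.any (fun kv => decide (kv.2 ≠ 0))),
       (if found then e else ((xs.filter (fun kv => decide (kv.2 ≠ 0))).map Prod.fst).headD e),
       ((xs.filter (fun kv => decide (kv.2 ≠ 0))).map Prod.fst).getLastD l,
       (xs.foldl pvPeakStep (p, pv)).1,
       (xs.foldl pvPeakStep (p, pv)).2) := by
  induction xs with
  | nil => intro found e l p pv; simp
  | cons x xs ih =>
    intro found e l p pv
    simp only [List.foldl_cons]
    by_cases hz : x.2 = 0
    · have hstep : pvStepA (found, e, l, p, pv) x
          = (found, e, l, (pvPeakStep (p, pv) x).1, (pvPeakStep (p, pv) x).2) := by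
        simp [pvStepA, pvPeakStep, hz]
      rw [hstep, ih found e l _ _]
      simp [hz]
    · by_cases hf : found = false
      · have hstep : pvStepA (found, e, l, p, pv) x
            = (true, x.1, x.1, (pvPeakStep (p, pv) x).1, (pvPeakStep (p, pv) x).2) := by
          simp [pvStepA, pvPeakStep, hz, hf]
        rw [hstep, ih true x.1 x.1 _ _]
        simp [hz, hf, pvGetLastD_cons]
      · have hstep : pvStepA (found, e, l, p, pv) x
            = (found, e, x.1, (pvPeakStep (p, pv) x).1, (pvPeakStep (p, pv) x).2) := by
          simp [pvStepA, pvPeakStep, hz, hf]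
        rw [hstep, ih found e x.1 _ _]
        simp [hz, hf, pvGetLastD_cons]

-- first element of a filtered list is the first match
theorem pvHead_filter (p : String × Int → Bool) (xs : List (String × Int)) :
    (xs.filter p).head? = xs.find? p := by
  induction xs with
  | nil => rfl
  | cons x t ih =>
    by_cases h : p x = true
    · simp [h]
    · simp [h, ih]

-- PySem.List.max? is the none-seeded fold of pvMaxStep (definitional)
theorem pvMax?_def (xs : List (String × Int)) :
    PySem.List.max? xs Prod.snd = xs.foldl pvMaxStep none := by
  unfold PySem.List.max?
  congr 1
  funext acc x
  cases acc <;> rfl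

-- a some-seeded pvMaxStep fold carries pvPeakStep
theorem pvFold_some (xs : List (String × Int)) : ∀ s : String × Int,
    xs.foldl pvMaxStep (some s) = some (xs.foldl pvPeakStep s) := by
  induction xs with
  | nil => intro s; rfl
  | cons x t ih =>
    intro s
    simp only [List.foldl_cons]
    have : pvMaxStep (some s) x = some (pvPeakStep s x) := by
      by_cases h : s.2 < x.2 <;> simp [pvMaxStep, pvPeakStep, h]
    rw [this, ih]

-- seeding the max fold: the seed survives unless some element strictly exceeds it
theorem pvFold_seed (xs : List (String × Int)) : ∀ s : String × Int,
    xs.foldl pvMaxStep (some s) =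
      match xs.foldl pvMaxStep none with
      | none => some s
      | some m => if s.2 < m.2 then some m else some s := by
  induction xs with
  | nil => intro s; rfl
  | cons x t ih =>
    intro s
    simp only [List.foldl_cons]
    have h1 : pvMaxStep none x = some x := rfl
    have h2 : pvMaxStep (some s) x = some (if s.2 < x.2 then x else s) := by
      by_cases h : s.2 < x.2 <;> simp [pvMaxStep, h]
    rw [h1, h2, ih, ih x]
    cases hm : t.foldl pvMaxStep none with
    | none =>
      by_cases h : s.2 < x.2 <;> simp [h]
    | some m =>
      by_cases hsx : s.2 < x.2
      · by_cases hxm : x.2 < m.2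
        · simp [hsx, hxm, show s.2 < m.2 by omega]
        · simp [hsx, hxm]
      · by_cases hxm : x.2 < m.2
        · by_cases hsm : s.2 < m.2 <;> simp [hsx, hxm, hsm]
        · simp [hsx, hxm, show ¬ s.2 < m.2 by omega]

-- head of Python's stable descending sort is the first maximal element (PySem.List.max?)
theorem pvSortedHead (xs : List (String × Int)) :
    (PySem.List.sorted xs Prod.snd true).head? = PySem.List.max? xs Prod.snd := by
  induction xs using List.reverseRecOn with
  | nil => rfl
  | append_singleton t x ih =>
    have hs : PySem.List.sorted (t ++ [x]) Prod.snd true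
        = PySem.List.insertBy (fun a b => decide (Prod.snd b < Prod.snd a)) x
            (PySem.List.sorted t Prod.snd true) := by
      simp [PySem.List.sorted, List.foldl_append]
    have hm : PySem.List.max? (t ++ [x]) Prod.snd
        = pvMaxStep (PySem.List.max? t Prod.snd) x := by
      simp [pvMax?_def, List.foldl_append]
    rw [hs, hm]
    cases hst : PySem.List.sorted t Prod.snd true with
    | nil =>
      rw [hst] at ih
      simp [← ih, PySem.List.insertBy, pvMaxStep]
    | cons m r =>
      rw [hst] at ih
      simp only [List.head?_cons] at ih
      by_cases h : m.2 < x.2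
      · simp [PySem.List.insertBy, ← ih, pvMaxStep, h]
      · simp [PySem.List.insertBy, ← ih, pvMaxStep, h]

-- A's running-peak fold from ("00:00", 0) equals B's guarded head-of-sorted
theorem pvPeak_sorted (xs : List (String × Int)) :
    xs.foldl pvPeakStep ("00:00", 0) =
      match (PySem.List.sorted xs Prod.snd true).head? with
      | some r => if 0 < r.2 then r else ("00:00", 0)
      | none => ("00:00", 0) := by
  have h1 : some (xs.foldl pvPeakStep ("00:00", 0))
      = xs.foldl pvMaxStep (some ("00:00", 0)) := (pvFold_some xs _).symm
  rw [pvFold_seed xs ("00:00", 0)] at h1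
  rw [pvSortedHead, pvMax?_def]
  cases hm : xs.foldl pvMaxStep none with
  | none => rw [hm] at h1; simpa using h1
  | some m =>
    rw [hm] at h1
    by_cases hpos : (0:Int) < m.2
    · simp only [hpos, if_true, Option.some.injEq] at h1
      simp [hpos, h1]
    · simp only [hpos, if_false, Option.some.injEq] at h1
      simp [hpos, h1]

theorem deriveActivityInfo_spec : Claim_equal_deriveActivityInfo := by
  intro ct _ _
  unfold Spec_deriveActivityInfo deriveActivityInfo deriveActivityInfo_alt
  have h := pvFoldA_eq ct false "" "" "00:00" 0
  rw [h]
  have hE : ((ct.filter (fun kv => decide (kv.2 ≠ 0))).map Prod.fst).headD ""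
      = ((ct.find? (fun kv => decide (kv.2 ≠ 0))).map Prod.fst).getD "" := by
    rw [List.headD_eq_head?_getD, List.head?_map, pvHead_filter]
  have hL : ((ct.filter (fun kv => decide (kv.2 ≠ 0))).map Prod.fst).getLastD ""
      = ((ct.reverse.find? (fun kv => decide (kv.2 ≠ 0))).map Prod.fst).getD "" := by
    rw [List.getLastD_eq_getLast?, List.getLast?_eq_head?_reverse, ← List.map_reverse,
        List.head?_map, ← List.filter_reverse, pvHead_filter]
  have hP := pvPeak_sorted ct
  simp only [Bool.false_eq_true, if_false, hE, hL, hP]
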